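-- pv_equiv track=rewrite | github.com/imehtn/TIP_102 | Unit2/sess1/v1_standardproblems.py | schedule_pattern
-- ===== SOURCE A (Python) =====
-- def schedule_pattern(pattern, schedule):
--     genres = schedule.split()
--
--     if len(pattern) != len(genres):
--         return False
--
--     char_to_genre = {}
--     for char, genre in zip(pattern, genres):
--         char_to_genre[char] = genre
--
--     new = []
--     for char in pattern:
--         if char in char_to_genre:
--             new.append(char_to_genre[char])
--
--     return new == genres
-- ===== SOURCE B (Python) =====
-- def schedule_pattern(pattern, schedule):
--     genres = schedule.split()
--     if len(pattern) != len(genres):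
--         return False
--     mapping = {}
--     for char, genre in zip(pattern, genres):
--         prev = mapping.get(char)
--         if prev is None:
--             mapping[char] = genre
--         elif prev != genre:
--             return False
--     return True
-- ===== Notes on version B (the rewrite author's own statement) =====
-- stated objective: idiomatic
-- what changed: Replaces A's build-full-dict-then-reconstruct-a-list-and-compare with a single pass over zip(pattern, genres) that records the first genre seen per char and returns False at the first inconsistency.
import Mathlib
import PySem

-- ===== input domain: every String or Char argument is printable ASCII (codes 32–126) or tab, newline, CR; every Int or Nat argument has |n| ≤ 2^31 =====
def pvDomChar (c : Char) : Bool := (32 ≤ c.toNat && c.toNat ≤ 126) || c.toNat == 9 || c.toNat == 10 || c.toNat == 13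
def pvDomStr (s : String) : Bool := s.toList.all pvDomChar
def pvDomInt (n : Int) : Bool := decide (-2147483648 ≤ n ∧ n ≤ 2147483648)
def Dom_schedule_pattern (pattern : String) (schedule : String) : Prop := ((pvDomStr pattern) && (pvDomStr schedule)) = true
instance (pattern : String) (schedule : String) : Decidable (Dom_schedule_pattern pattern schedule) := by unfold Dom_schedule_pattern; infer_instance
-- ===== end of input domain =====

-- B replaces A's build-dict-then-reconstruct-and-compare with a single zip pass that
-- records the first genre per char and stops at the first inconsistency (idiomatic).

-- ===== PORT A =====
def schedule_pattern (pattern : String) (schedule : String) : Bool :=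
  let genres := PySem.Str.split₀ schedule
  if PySem.Str.len pattern ≠ PySem.List.len genres then false
  else
    let char_to_genre := (pattern.toList.zip genres).foldl
      (fun d p => d.insert p.1 p.2) PySem.Dict.empty
    let new := pattern.toList.foldl
      (fun acc c => if char_to_genre.contains c then acc ++ [char_to_genre.getD c ""] else acc) []
    decide (new = genres)

-- ===== PORT B =====
def pvCheck (m : PySem.Dict Char String) : List (Char × String) → Bool
  | [] => true
  | (c, g) :: rest =>
    match m.get? c with
    | none => pvCheck (m.insert c g) rest
    | some prev => if prev ≠ g then false else pvCheck m rest

def schedule_pattern_alt (pattern : String) (schedule : String) : Bool :=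
  let genres := PySem.Str.split₀ schedule
  if PySem.Str.len pattern ≠ PySem.List.len genres then false
  else pvCheck PySem.Dict.empty (pattern.toList.zip genres)

-- ===== PRECONDITION & SPEC =====
def Spec_schedule_pattern (pattern : String) (schedule : String) (out : Bool) : Prop := out = schedule_pattern_alt pattern schedule
instance (pattern : String) (schedule : String) (out : Bool) : Decidable (Spec_schedule_pattern pattern schedule out) := by unfold Spec_schedule_pattern; infer_instance

-- ===== CLAIM (what is proved, stated in full; the proofs are below) =====
def Claim_equal_schedule_pattern : Prop := ∀ (pattern : String) (schedule : String), Dom_schedule_pattern pattern schedule → Spec_schedule_pattern pattern schedule (schedule_pattern pattern schedule)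

-- ===== LEMMAS AND PROOFS =====

/-- Consistency of a zip list: equal chars carry equal genres. -/
def pvConsistent (L : List (Char × String)) : Prop :=
  ∀ p ∈ L, ∀ q ∈ L, p.1 = q.1 → p.2 = q.2

/-- Lookups in a dict built by A's insert loop come from the list or the start dict. -/
theorem pv_get_foldl_insert (L : List (Char × String)) (d : PySem.Dict Char String)
    (c : Char) (g : String)
    (h : (L.foldl (fun d p => d.insert p.1 p.2) d).get? c = some g) :
    (c, g) ∈ L ∨ d.get? c = some g := by
  induction L generalizing d with
  | nil => exact Or.inr h
  | cons a L ih =>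
    rcases ih (d.insert a.1 a.2) h with h1 | h2
    · exact Or.inl (List.mem_cons_of_mem _ h1)
    · rw [PySem.Dict.get?_insert] at h2
      by_cases hc : c = a.1
      · left
        rw [if_pos hc] at h2
        injection h2 with h2
        have : (c, g) = a := by obtain ⟨a1, a2⟩ := a; simp_all
        rw [this]
        exact List.mem_cons_self
      · right; rwa [if_neg hc] at h2

/-- Every listed key is present in the dict built by A's insert loop. -/
theorem pv_contains_foldl_insert (L : List (Char × String)) (d : PySem.Dict Char String)
    (c : Char) (h : ∃ g, (c, g) ∈ L ∨ d.get? c = some g) :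
    ((L.foldl (fun d p => d.insert p.1 p.2) d).get? c).isSome := by
  induction L generalizing d with
  | nil =>
    rcases h with ⟨g, hg | hg⟩
    · simp at hg
    · simp [hg]
  | cons a L ih =>
    apply ih
    rcases h with ⟨g, hg | hg⟩
    · rcases List.mem_cons.mp hg with h1 | h1
      · refine ⟨a.2, Or.inr ?_⟩
        have : c = a.1 := by cases a; simp_all
        simp [this]
      · exact ⟨g, Or.inl h1⟩
    · by_cases hc : c = a.1
      · exact ⟨a.2, Or.inr (by rw [PySem.Dict.get?_insert, if_pos hc])⟩
      · exact ⟨g, Or.inr (by rw [PySem.Dict.get?_insert, if_neg hc]; exact hg)⟩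

/-- A's second loop, when every char is present, is a map over the chars. -/
theorem pv_foldl_new (d : PySem.Dict Char String) (cs : List Char) (acc : List String)
    (h : ∀ c ∈ cs, d.contains c = true) :
    cs.foldl (fun acc c => if d.contains c then acc ++ [d.getD c ""] else acc) acc
      = acc ++ cs.map (fun c => d.getD c "") := by
  induction cs generalizing acc with
  | nil => simp
  | cons c cs ih =>
    simp only [List.foldl_cons, h c (by simp), if_pos, List.map_cons]
    rw [ih _ (fun x hx => h x (by simp [hx]))]
    simp

/-- B's loop characterisation: true iff the list is consistent with the accumulator
    and internally consistent. -/
theorem pv_pvCheck_iff (L : List (Char × String)) (m : PySem.Dict Char String) :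
    pvCheck m L = true ↔
      ((∀ p ∈ L, ∀ v, m.get? p.1 = some v → v = p.2) ∧ pvConsistent L) := by
  induction L generalizing m with
  | nil => simp [pvCheck, pvConsistent]
  | cons a L ih =>
    obtain ⟨c, g⟩ := a
    cases hm : m.get? c with
    | none =>
      simp only [pvCheck, hm, ih]
      constructor
      · rintro ⟨hC, hP⟩
        refine ⟨?_, ?_⟩
        · rintro p hp v hv
          rcases List.mem_cons.mp hp with rfl | hp
          · simp [hm] at hv
          · by_cases hc : p.1 = c
            · rw [hc, hm] at hv; cases hv
            · exact hC p hp v (by rwa [PySem.Dict.get?_insert, if_neg hc])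
        · rintro p hp q hq hpq
          rcases List.mem_cons.mp hp with rfl | hp <;>
            rcases List.mem_cons.mp hq with rfl | hq
          · rfl
          · exact hC q hq g (by rw [← hpq, PySem.Dict.get?_insert, if_pos rfl])
          · exact (hC p hp g (by rw [hpq, PySem.Dict.get?_insert, if_pos rfl])).symm
          · exact hP p hp q hq hpq
      · rintro ⟨hC, hP⟩
        refine ⟨?_, ?_⟩
        · rintro p hp v hv
          rw [PySem.Dict.get?_insert] at hv
          by_cases hc : p.1 = c
          · rw [if_pos hc] at hv; cases hv
            exact (hP (c, g) (by simp) p (List.mem_cons_of_mem _ hp) hc.symm)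
          · exact hC p (List.mem_cons_of_mem _ hp) v (by rwa [if_neg hc] at hv)
        · exact fun p hp q hq => hP p (List.mem_cons_of_mem _ hp) q (List.mem_cons_of_mem _ hq)
    | some w =>
      simp only [pvCheck, hm]
      by_cases hwg : w = g
      · subst hwg
        rw [if_neg (fun hh => hh rfl)]
        rw [ih]
        constructor
        · rintro ⟨hC, hP⟩
          refine ⟨?_, ?_⟩
          · rintro p hp v hv
            rcases List.mem_cons.mp hp with rfl | hp
            · rw [hm] at hv; cases hv; rfl
            · exact hC p hp v hv
          · rintro p hp q hq hpq
            rcases List.mem_cons.mp hp with rfl | hp <;>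
              rcases List.mem_cons.mp hq with rfl | hq
            · rfl
            · exact hC q hq w (by rw [← hpq, hm])
            · exact (hC p hp w (by rw [hpq, hm])).symm
            · exact hP p hp q hq hpq
        · rintro ⟨hC, hP⟩
          exact ⟨fun p hp v hv => hC p (List.mem_cons_of_mem _ hp) v hv,
            fun p hp q hq => hP p (List.mem_cons_of_mem _ hp) q (List.mem_cons_of_mem _ hq)⟩
      · simp only [ne_eq, hwg, not_false_eq_true, if_pos]
        constructor
        · intro h; cases h
        · rintro ⟨hC, _⟩
          exact absurd (hC (c, g) (by simp) w hm) hwg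

/-- A's reconstruction equals the genre list iff the zip list is consistent. -/
theorem pv_A_map_iff (L : List (Char × String)) :
    (L.map (fun p => ((L.foldl (fun d p => d.insert p.1 p.2) PySem.Dict.empty).getD p.1 ""))
      = L.map Prod.snd) ↔ pvConsistent L := by
  set d := L.foldl (fun d p => d.insert p.1 p.2) PySem.Dict.empty with hd
  rw [List.map_inj_left]
  constructor
  · intro h p hp q hq hpq
    have := h p hp
    have hq' := h q hq
    rw [← this, ← hq', hpq]
  · intro hP p hp
    have hs : ((d.get? p.1).isSome) := by
      apply pv_contains_foldl_insert
      exact ⟨p.2, Or.inl (by simpa using hp)⟩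
    obtain ⟨g, hg⟩ := Option.isSome_iff_exists.mp hs
    have hmem : (p.1, g) ∈ L := by
      rcases pv_get_foldl_insert L PySem.Dict.empty p.1 g hg with h1 | h1
      · exact h1
      · simp [PySem.Dict.get?_empty] at h1
    have : g = p.2 := hP (p.1, g) hmem p hp rfl
    rw [PySem.Dict.getD_eq_get?_getD, hg, this, Option.getD_some]

-- ===== VERDICT (by name: the statement is the Claim_ definition above) =====
theorem schedule_pattern_spec : Claim_equal_schedule_pattern := by
  intro pattern schedule _
  unfold Spec_schedule_pattern schedule_pattern schedule_pattern_alt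
  by_cases hl : PySem.Str.len pattern ≠ PySem.List.len (PySem.Str.split₀ schedule)
  · rw [if_pos hl, if_pos hl]
  · rw [if_neg hl, if_neg hl]
    rw [not_not] at hl
    set genres := PySem.Str.split₀ schedule with hg
    have hlen : pattern.toList.length = genres.length := by
      simp only [PySem.Str.len, PySem.List.len_eq] at hl
      exact_mod_cast hl
    set L := pattern.toList.zip genres with hL
    have hfst : L.map Prod.fst = pattern.toList := List.map_fst_zip (le_of_eq hlen)
    have hsnd : L.map Prod.snd = genres := List.map_snd_zip (le_of_eq hlen.symm)
    set d := L.foldl (fun d p => d.insert p.1 p.2) PySem.Dict.empty with hd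
    have hcont : ∀ c ∈ pattern.toList, d.contains c = true := by
      intro c hc
      rw [← hfst] at hc
      obtain ⟨p, hp, hpc⟩ := List.mem_map.mp hc
      rw [PySem.Dict.contains_eq_isSome_get?]
      exact pv_contains_foldl_insert L PySem.Dict.empty c
        ⟨p.2, Or.inl (by rw [← hpc]; simpa using hp)⟩
    dsimp only
    rw [pv_foldl_new d pattern.toList [] hcont, List.nil_append]
    have hmapc : pattern.toList.map (fun c => d.getD c "") = L.map (fun p => d.getD p.1 "") := by
      rw [← hfst, List.map_map]; rfl
    rw [hmapc, ← hsnd, Bool.eq_iff_iff, decide_eq_true_eq,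
      pv_A_map_iff, pv_pvCheck_iff]
    constructor
    · intro h
      exact ⟨by simp [PySem.Dict.get?_empty], h⟩
    · exact fun h => h.2
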